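-- pv_equiv track=rewrite | github.com/gh-workflow/multiarch-image-publish | tests/repo_rules/test_visibility.py | _private_parent_package
-- ===== SOURCE A (Python) =====
-- def _private_parent_package(module_name: str) -> list[str] | None:
--     parts = module_name.split(".")
--     for index, part in enumerate(parts):
--         if part.startswith("_"):
--             if index == 0:
--                 return []
--             return parts[:index]
--     return None
-- ===== SOURCE B (Python) =====
-- def _private_parent_package(module_name: str) -> list[str] | None:
--     parts = module_name.split(".")
--     prefix = []
--     for part in parts:
--         if part.startswith("_"):
--             break
--         prefix.append(part)
--     return None if len(prefix) == len(parts) else prefix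
-- ===== Notes on version B (the rewrite author's own statement) =====
-- stated objective: alternative
-- what changed: Replaces A's enumerate loop with index-based early returns and a parts[:index] slice by a compute-the-prefix-run-then-compare-lengths decomposition: collect the run of non-private segments, then return None iff the run covers all parts, else the run itself.
import Mathlib
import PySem

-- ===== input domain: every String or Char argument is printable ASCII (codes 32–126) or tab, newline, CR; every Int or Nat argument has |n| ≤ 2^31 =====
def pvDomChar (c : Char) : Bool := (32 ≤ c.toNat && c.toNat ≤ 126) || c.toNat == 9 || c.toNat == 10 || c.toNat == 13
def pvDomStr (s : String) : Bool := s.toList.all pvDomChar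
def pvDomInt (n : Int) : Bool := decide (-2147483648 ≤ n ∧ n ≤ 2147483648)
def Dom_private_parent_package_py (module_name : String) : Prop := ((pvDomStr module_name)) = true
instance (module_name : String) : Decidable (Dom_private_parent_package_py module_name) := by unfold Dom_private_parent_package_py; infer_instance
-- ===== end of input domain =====

-- B replaces A's indexed early-return loop by collecting the run of non-private
-- segments and deciding at the end by a length comparison (alternative decomposition).


-- ===== PORT A =====
-- the 'for index, part in enumerate(parts)' loop with its early returns
def privLoopA (parts : List String) : List (Int × String) → Option (List String)
  | [] => none
  | (index, part) :: rest =>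
    if PySem.Str.startswith part "_" then
      if index = 0 then some []
      else some (PySem.List.slice parts none (some index))
    else privLoopA parts rest

-- module_name.split(".") — exact: sep "." is nonempty, so split? is always 'some'
def pySplitDot (m : String) : List String := (PySem.Str.split? m ".").getD []

def private_parent_package_py (module_name : String) : Option (List String) :=
  let parts := pySplitDot module_name
  privLoopA parts (PySem.List.enumerate parts 0)

-- ===== PORT B =====
-- the 'for part in parts: if part.startswith("_"): break; prefix.append(part)' loop
def privPrefixB : List String → List String
  | [] => []
  | part :: rest =>
    if PySem.Str.startswith part "_" then []
    else part :: privPrefixB rest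

def private_parent_package_py_alt (module_name : String) : Option (List String) :=
  let parts := pySplitDot module_name
  let pref := privPrefixB parts
  if pref.length = parts.length then none else some pref

-- ===== PRECONDITION & SPEC =====
def Spec_private_parent_package_py (module_name : String) (out : Option (List String)) : Prop := out = private_parent_package_py_alt module_name
instance (module_name : String) (out : Option (List String)) : Decidable (Spec_private_parent_package_py module_name out) := by unfold Spec_private_parent_package_py; infer_instance

-- ===== CLAIM (what is proved, stated in full; the proofs are below) =====
def Claim_equal_private_parent_package_py : Prop := ∀ (module_name : String), Dom_private_parent_package_py module_name → Spec_private_parent_package_py module_name (private_parent_package_py module_name)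

-- ===== LEMMAS AND PROOFS =====

theorem privLoop_eq (suf : List String) : ∀ (pre : List String),
    privLoopA (pre ++ suf) (PySem.List.enumerate suf (pre.length : Int)) =
      (if (privPrefixB suf).length = suf.length then none
       else some (pre ++ privPrefixB suf)) := by
  induction suf with
  | nil =>
    intro pre
    simp [privLoopA, privPrefixB, PySem.List.enumerate_nil]
  | cons p rest ih =>
    intro pre
    rw [PySem.List.enumerate_cons]
    by_cases h : PySem.Str.startswith p "_" = true
    · simp only [privLoopA, privPrefixB, h]
      by_cases h0 : pre.length = 0
      · have : pre = [] := List.length_eq_zero_iff.mp h0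
        subst this
        simp
      · have hne : ((pre.length : Int)) ≠ 0 := by exact_mod_cast h0
        simp only [hne, if_false]
        rw [PySem.List.slice_to_natCast]
        simp [List.take_append_of_le_length (Nat.le_refl _)]
    · have h' : PySem.Str.startswith p "_" = false := by simpa using h
      have step : privLoopA (pre ++ p :: rest) (PySem.List.enumerate rest ((pre.length : Int) + 1)) =
          privLoopA ((pre ++ [p]) ++ rest) (PySem.List.enumerate rest (((pre ++ [p]).length : Int))) := by
        simp [List.append_assoc]
      simp only [privLoopA, privPrefixB, h', Bool.false_eq_true, if_false]
      rw [step, ih (pre ++ [p])]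
      simp only [List.length_cons, List.append_assoc, List.cons_append, List.nil_append]
      by_cases hl : (privPrefixB rest).length = rest.length <;> simp [hl]

-- ===== VERDICT (by name: the statement is the Claim_ definition above) =====
theorem private_parent_package_py_spec : Claim_equal_private_parent_package_py := by
  intro m _
  unfold Spec_private_parent_package_py private_parent_package_py private_parent_package_py_alt
  have := privLoop_eq (pySplitDot m) []
  simpa using this
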